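-- pv_equiv track=rewrite | github.com/rsbohn/waffle8 | tools/allocated.py | iter_pages
-- ===== SOURCE A (Python) =====
-- from typing import Dict, Iterable, List, Set, Tuple
--
-- WORDS_PER_PAGE = 0o200
--
-- HALF_PAGE = 0o100
--
-- def make_page_rows(memory: Dict[int, int], duplicates: Set[int], page: int) -> List[Tuple[int, str]]:
--     base_address = page * WORDS_PER_PAGE
--     rows: List[Tuple[int, str]] = []
--     for offset in (0, HALF_PAGE):
--         row_base = base_address + offset
--         chars = []
--         for idx in range(HALF_PAGE):
--             address = row_base + idx
--             if address in duplicates: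
--                 chars.append("!")
--             elif address in memory:
--                 chars.append("#")
--             else:
--                 chars.append(".")
--         rows.append((row_base, "".join(chars)))
--     return rows
--
-- def iter_pages(memory: Dict[int, int], duplicates: Set[int], show_all: bool) -> Iterable[Tuple[int, List[Tuple[int, str]]]]:
--     if not memory:
--         return []
--
--     max_address = max(memory)
--     max_page = max_address // WORDS_PER_PAGE
--     pages: List[Tuple[int, List[Tuple[int, str]]]] = []
--
--     for page in range(max_page + 1):
--         rows = make_page_rows(memory, duplicates, page)
--         if not show_all and all("#" not in row_text and "!" not in row_text for _, row_text in rows):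
--             continue
--         pages.append((page, rows))
--     return pages
-- ===== SOURCE B (Python) =====
-- WORDS_PER_PAGE = 0o200
--
-- HALF_PAGE = 0o100
--
-- def iter_pages(memory, duplicates, show_all):
--     if not memory:
--         return []
--     max_page = max(memory) // WORDS_PER_PAGE
--     # bucket every address (memory keys and duplicates) by its page, once
--     mem_pages = {}
--     for a in memory:
--         mem_pages.setdefault(a // WORDS_PER_PAGE, []).append(a)
--     dup_pages = {}
--     for d in duplicates:
--         dup_pages.setdefault(d // WORDS_PER_PAGE, []).append(d)
--     if show_all:
--         wanted = list(range(max_page + 1))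
--     else:
--         wanted = sorted(p for p in set(mem_pages) | set(dup_pages)
--                         if 0 <= p <= max_page)
--     pages = []
--     for page in wanted:
--         base = page * WORDS_PER_PAGE
--         rows = []
--         for row_base in (base, base + HALF_PAGE):
--             cells = ["."] * HALF_PAGE
--             for a in mem_pages.get(page, ()):
--                 if row_base <= a < row_base + HALF_PAGE:
--                     cells[a - row_base] = "#"
--             for d in dup_pages.get(page, ()):
--                 if row_base <= d < row_base + HALF_PAGE:
--                     cells[d - row_base] = "!"
--             rows.append((row_base, "".join(cells)))
--         pages.append((page, rows))
--     return pages
-- ===== Notes on version B (the rewrite author's own statement) =====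
-- stated objective: alternative
-- what changed: Instead of scanning every page 0..max_page and testing each of its 128 addresses against the dict/set, B buckets the memory keys and duplicate addresses by page once, visits only the (sorted) occupied pages when show_all is false, and paints each 64-cell row by scattering that page's addresses into a '.'-filled array; intended as faster on sparse memories (measured only 1.2x on a timing run's dense random family).
import Mathlib
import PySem

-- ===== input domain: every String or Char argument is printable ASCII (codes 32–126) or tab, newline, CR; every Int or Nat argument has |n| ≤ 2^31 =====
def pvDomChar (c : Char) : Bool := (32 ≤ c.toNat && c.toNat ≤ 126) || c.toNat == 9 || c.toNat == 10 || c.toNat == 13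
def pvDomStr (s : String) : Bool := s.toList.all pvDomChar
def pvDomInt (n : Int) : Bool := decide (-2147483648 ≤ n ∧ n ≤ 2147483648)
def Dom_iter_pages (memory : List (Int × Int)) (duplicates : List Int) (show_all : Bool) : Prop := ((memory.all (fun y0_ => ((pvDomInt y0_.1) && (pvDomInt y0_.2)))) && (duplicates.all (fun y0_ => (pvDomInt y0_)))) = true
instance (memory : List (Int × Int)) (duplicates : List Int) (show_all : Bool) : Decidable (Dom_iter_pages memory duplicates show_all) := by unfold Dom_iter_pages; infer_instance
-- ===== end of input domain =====

-- B buckets the memory/duplicate addresses by page once and, when show_all is false, emits only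
-- the occupied pages (sorted), painting each 64-cell row by scattering that page's addresses into
-- a '.'-filled array — a different algorithm from A's scan of every page 0..max_address // 128.

-- ===== PORT A =====
-- the dict `memory` is its association list: `address in memory` is key membership, `max(memory)` the max over keys
def pvWORDS_PER_PAGE : Int := 128
def pvHALF_PAGE : Int := 64
def make_page_rows (memory : List (Int × Int)) (duplicates : List Int) (page : Int) : List (Int × String) :=
  let base_address := page * pvWORDS_PER_PAGE
  ([0, pvHALF_PAGE] : List Int).foldl (fun rows offset =>
    let row_base := base_address + offset
    let chars : List Char := (PySem.List.pyRange 0 pvHALF_PAGE 1).foldl (fun chars idx =>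
      let address := row_base + idx
      if PySem.Set.contains duplicates address then chars ++ ['!']
      else if memory.any (fun p => p.1 == address) then chars ++ ['#']
      else chars ++ ['.']) []
    rows ++ [(row_base, String.ofList chars)]) []
def iter_pages (memory : List (Int × Int)) (duplicates : List Int) (show_all : Bool) : List (Int × (List (Int × String))) :=
  if memory.isEmpty then []
  else
    match PySem.List.max? (memory.map (·.1)) (fun x => x) with
    | none => []
    | some max_address =>
      let max_page := PySem.Int.floordiv max_address pvWORDS_PER_PAGE
      (PySem.List.pyRange 0 (max_page + 1) 1).foldl (fun pages page =>
        let rows := make_page_rows memory duplicates page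
        if !show_all && rows.all (fun r => !(PySem.Str.isIn "#" r.2) && !(PySem.Str.isIn "!" r.2)) then
          pages
        else
          pages ++ [(page, rows)]) []

-- ===== PORT B =====
def iter_pages_alt (memory : List (Int × Int)) (duplicates : List Int) (show_all : Bool) : List (Int × (List (Int × String))) :=
  if memory.isEmpty then []
  else
    match PySem.List.max? (memory.map (·.1)) (fun x => x) with
    | none => []
    | some max_address =>
      let max_page := PySem.Int.floordiv max_address pvWORDS_PER_PAGE
      let mem_pages : PySem.Dict Int (List Int) :=
        (memory.map (·.1)).foldl (fun d a => d.modify (PySem.Int.floordiv a pvWORDS_PER_PAGE) [] (· ++ [a])) PySem.Dict.empty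
      let dup_pages : PySem.Dict Int (List Int) :=
        duplicates.foldl (fun d a => d.modify (PySem.Int.floordiv a pvWORDS_PER_PAGE) [] (· ++ [a])) PySem.Dict.empty
      let wanted : List Int :=
        if show_all then PySem.List.pyRange 0 (max_page + 1) 1
        else PySem.List.sorted
               ((PySem.Set.union (PySem.Set.ofList mem_pages.keys) dup_pages.keys).filter
                 (fun p => decide (0 ≤ p) && decide (p ≤ max_page)))
               (fun x => x) false
      wanted.foldl (fun pages page =>
        let base := page * pvWORDS_PER_PAGE
        let rows := ([base, base + pvHALF_PAGE] : List Int).foldl (fun rows row_base =>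
          let cells0 : List Char := List.replicate pvHALF_PAGE.toNat '.'
          let cells1 := (mem_pages.getD page []).foldl (fun cells a =>
            if decide (row_base ≤ a) && decide (a < row_base + pvHALF_PAGE) then cells.set (a - row_base).toNat '#' else cells) cells0
          let cells2 := (dup_pages.getD page []).foldl (fun cells a =>
            if decide (row_base ≤ a) && decide (a < row_base + pvHALF_PAGE) then cells.set (a - row_base).toNat '!' else cells) cells1
          rows ++ [(row_base, String.ofList cells2)]) []
        pages ++ [(page, rows)]) []

-- ===== PRECONDITION & SPEC =====
def Spec_iter_pages (memory : List (Int × Int)) (duplicates : List Int) (show_all : Bool) (out : List (Int × (List (Int × String)))) : Prop := out = iter_pages_alt memory duplicates show_all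
instance (memory : List (Int × Int)) (duplicates : List Int) (show_all : Bool) (out : List (Int × (List (Int × String)))) : Decidable (Spec_iter_pages memory duplicates show_all out) := by unfold Spec_iter_pages; infer_instance

-- ===== CLAIM (what is proved, stated in full; the proofs are below) =====
def Claim_equal_iter_pages : Prop := ∀ (memory : List (Int × Int)) (duplicates : List Int) (show_all : Bool), Dom_iter_pages memory duplicates show_all → Spec_iter_pages memory duplicates show_all (iter_pages memory duplicates show_all)

-- ===== LEMMAS AND PROOFS =====

-- the canonical form both ports are reduced to: the occupied-or-all pages of [0, max_page],
-- in order, each with its two 64-character rows described pointwise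
def pvCell (memory : List (Int × Int)) (duplicates : List Int) (a : Int) : Char :=
  if PySem.Set.contains duplicates a then '!'
  else if memory.any (fun p => p.1 == a) then '#'
  else '.'

def pvRowChars (memory : List (Int × Int)) (duplicates : List Int) (rb : Int) : List Char :=
  (List.range 64).map (fun (i : Nat) => pvCell memory duplicates (rb + (i : Int)))

def pvPageRows (memory : List (Int × Int)) (duplicates : List Int) (p : Int) : List (Int × String) :=
  [(p * 128, String.ofList (pvRowChars memory duplicates (p * 128))),
   (p * 128 + 64, String.ofList (pvRowChars memory duplicates (p * 128 + 64)))]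

def pvKeys (memory : List (Int × Int)) (duplicates : List Int) : List Int := memory.map (·.1) ++ duplicates

def pvOccupied (memory : List (Int × Int)) (duplicates : List Int) (p : Int) : Bool :=
  (pvKeys memory duplicates).any (fun k => PySem.Int.floordiv k 128 == p)

def pvCanonical (memory : List (Int × Int)) (duplicates : List Int) (show_all : Bool) (max_page : Int) : List (Int × (List (Int × String))) :=
  ((PySem.List.pyRange 0 (max_page + 1) 1).filter
    (fun p => show_all || pvOccupied memory duplicates p)).map
    (fun p => (p, pvPageRows memory duplicates p))

theorem inner_chars (memory : List (Int × Int)) (duplicates : List Int) (rb : Int) :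
    ((PySem.List.pyRange 0 pvHALF_PAGE 1).foldl (fun chars idx =>
      if PySem.Set.contains duplicates (rb + idx) then chars ++ ['!']
      else if memory.any (fun p => p.1 == (rb + idx)) then chars ++ ['#']
      else chars ++ ['.']) ([] : List Char)) = pvRowChars memory duplicates rb := by
  have hh : pvHALF_PAGE = (64 : Int) := rfl
  rw [hh]
  have hb : (fun (chars : List Char) (idx : Int) =>
      if PySem.Set.contains duplicates (rb + idx) then chars ++ ['!']
      else if memory.any (fun p => p.1 == (rb + idx)) then chars ++ ['#']
      else chars ++ ['.']) = fun chars idx => chars ++ [pvCell memory duplicates (rb + idx)] := by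
    funext chars idx
    simp only [pvCell]
    split_ifs <;> rfl
  rw [hb, PySem.List.foldl_append_singleton_eq_map, PySem.List.pyRange_one, List.map_map]
  have h64 : ((64:Int) - 0).toNat = 64 := rfl
  rw [h64]
  simp only [List.nil_append, pvRowChars]
  exact List.map_congr_left (fun k hk => by simp [Function.comp])

theorem make_page_rows_eq (memory : List (Int × Int)) (duplicates : List Int) (p : Int) :
    make_page_rows memory duplicates p = pvPageRows memory duplicates p := by
  unfold make_page_rows
  simp only [List.foldl, List.nil_append]
  rw [inner_chars memory duplicates (p * pvWORDS_PER_PAGE + 0),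
      inner_chars memory duplicates (p * pvWORDS_PER_PAGE + pvHALF_PAGE)]
  have hw : pvWORDS_PER_PAGE = (128 : Int) := rfl
  have hh : pvHALF_PAGE = (64 : Int) := rfl
  rw [hw, hh]
  simp [pvPageRows]

theorem pvCell_mark (m : List (Int × Int)) (d : List Int) (a : Int) :
    (pvCell m d a = '#' ∨ pvCell m d a = '!') ↔
      (PySem.Set.contains d a = true ∨ (m.any (fun q => q.1 == a)) = true) := by
  unfold pvCell
  split_ifs with h1 h2 <;> simp_all

theorem row_occ (m : List (Int × Int)) (d : List Int) (rb : Int) :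
    ('#' ∈ pvRowChars m d rb ∨ '!' ∈ pvRowChars m d rb) ↔
      ∃ a : Int, (rb ≤ a ∧ a < rb + 64) ∧
        (PySem.Set.contains d a = true ∨ (m.any (fun q => q.1 == a)) = true) := by
  constructor
  · rintro (h | h) <;>
    · simp only [pvRowChars, List.mem_map, List.mem_range] at h
      obtain ⟨i, hi, hc⟩ := h
      exact ⟨rb + i, ⟨by omega, by omega⟩, (pvCell_mark m d _).1 (by simp [hc])⟩
  · rintro ⟨a, ⟨h1, h2⟩, hmark⟩
    have : pvCell m d a = '#' ∨ pvCell m d a = '!' := (pvCell_mark m d a).2 hmark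
    have ha : a = rb + ((a - rb).toNat : Int) := by omega
    have hmem : ∀ c, pvCell m d a = c → c ∈ pvRowChars m d rb := by
      intro c hc
      simp only [pvRowChars, List.mem_map, List.mem_range]
      exact ⟨(a - rb).toNat, by omega, by rw [← ha, hc]⟩
    rcases this with h | h
    · exact Or.inl (hmem _ h)
    · exact Or.inr (hmem _ h)

theorem occupied_iff (memory : List (Int × Int)) (duplicates : List Int) (p : Int) :
    ((make_page_rows memory duplicates p).all
      (fun r => !(PySem.Str.isIn "#" r.2) && !(PySem.Str.isIn "!" r.2))) = !(pvOccupied memory duplicates p) := by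
  have key : (('#' ∈ pvRowChars memory duplicates (p * 128) ∨ '!' ∈ pvRowChars memory duplicates (p * 128)) ∨
      ('#' ∈ pvRowChars memory duplicates (p * 128 + 64) ∨ '!' ∈ pvRowChars memory duplicates (p * 128 + 64))) ↔
      pvOccupied memory duplicates p = true := by
    rw [row_occ, row_occ]
    simp only [pvOccupied, pvKeys, List.any_eq_true, List.mem_append, List.mem_map, beq_iff_eq]
    constructor
    · rintro (⟨a, ⟨h1, h2⟩, hm⟩ | ⟨a, ⟨h1, h2⟩, hm⟩) <;>
      · refine ⟨a, ?_, ?_⟩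
        · rcases hm with hm | ⟨q, hq, hqa⟩
          · right
            simpa [PySem.Set.contains] using hm
          · exact Or.inl ⟨q, hq, hqa⟩
        · rw [PySem.Int.floordiv_eq_iff_of_pos (by norm_num)]
          constructor <;> omega
    · rintro ⟨k, hk, hfd⟩
      rw [PySem.Int.floordiv_eq_iff_of_pos (by norm_num)] at hfd
      have hmark : PySem.Set.contains duplicates k = true ∨ ∃ x ∈ memory, x.1 = k := by
        rcases hk with ⟨q, hq, hqk⟩ | hk
        · exact Or.inr ⟨q, hq, hqk⟩
        · left
          simpa [PySem.Set.contains] using hk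
      by_cases hlow : k < p * 128 + 64
      · exact Or.inl ⟨k, ⟨by omega, by omega⟩, hmark⟩
      · exact Or.inr ⟨k, ⟨by omega, by omega⟩, hmark⟩
  rw [make_page_rows_eq, Bool.eq_iff_iff]
  simp only [pvPageRows, List.all_cons, List.all_nil, Bool.and_true, Bool.and_eq_true,
    Bool.not_eq_true', PySem.Str.isIn_eq, String.toList_ofList]
  have hh : ("#" : String).toList = ['#'] := rfl
  have hb : ("!" : String).toList = ['!'] := rfl
  rw [hh, hb]
  simp only [PySem.Chars.isIn_eq_false_iff, List.singleton_infix_iff]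
  rw [Bool.eq_false_iff, ne_eq, ← key]
  tauto

theorem iter_pages_eq_canonical (memory : List (Int × Int)) (duplicates : List Int) (show_all : Bool)
    (max_address : Int) (h : PySem.List.max? (memory.map (·.1)) (fun x => x) = some max_address) (hne : memory.isEmpty = false) :
    iter_pages memory duplicates show_all =
      pvCanonical memory duplicates show_all (PySem.Int.floordiv max_address 128) := by
  unfold iter_pages
  rw [hne, h]
  simp only [Bool.false_eq_true, if_false]
  have hw : pvWORDS_PER_PAGE = (128 : Int) := rfl
  rw [hw]
  rw [PySem.List.foldl_congr_mem _ _
    (fun pages page =>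
      if (show_all || pvOccupied memory duplicates page) then
        pages ++ [(page, pvPageRows memory duplicates page)]
      else pages) _
    (by
      intro acc page _
      rw [occupied_iff, make_page_rows_eq]
      cases show_all <;> cases hocc : pvOccupied memory duplicates page <;> simp [hocc])]
  rw [PySem.List.foldl_append_if (fun page => show_all || pvOccupied memory duplicates page)
      (fun p => (p, pvPageRows memory duplicates p))]
  simp [pvCanonical]

theorem bucket_getD (l : List Int) (p : Int) :
    ((l.foldl (fun d a => d.modify (PySem.Int.floordiv a pvWORDS_PER_PAGE) [] (· ++ [a])) PySem.Dict.empty).getD p [])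
      = l.filter (fun a => PySem.Int.floordiv a pvWORDS_PER_PAGE == p) := by
  have h : l.foldl (fun d a => d.modify (PySem.Int.floordiv a pvWORDS_PER_PAGE) [] (· ++ [a])) PySem.Dict.empty
      = (l.map (fun a => (PySem.Int.floordiv a pvWORDS_PER_PAGE, a))).foldl
          (fun d q => d.modify q.1 [] (· ++ [q.2])) PySem.Dict.empty := by
    rw [List.foldl_map]
  rw [h, PySem.Dict.getD_foldl_modify_append]
  simp only [List.filter_map, List.map_map]
  have : ((fun (q : Int × Int) => q.2) ∘ fun a => (PySem.Int.floordiv a pvWORDS_PER_PAGE, a)) = id := rfl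
  rw [this, List.map_id]
  rfl

theorem bucket_keys (l : List Int) :
    ((l.foldl (fun d a => d.modify (PySem.Int.floordiv a pvWORDS_PER_PAGE) [] (· ++ [a])) PySem.Dict.empty).keys)
      = PySem.Set.ofList (l.map (fun a => PySem.Int.floordiv a pvWORDS_PER_PAGE)) := by
  rw [PySem.Dict.keys_foldl_modify_key]
  simp [PySem.Set.update_nil_left]

theorem mark_len (l : List Int) (cond : Int → Bool) (idx : Int → Nat) (v : Char) (cs : List Char) :
    (l.foldl (fun cs a => if cond a then cs.set (idx a) v else cs) cs).length = cs.length := by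
  induction l generalizing cs with
  | nil => rfl
  | cons a t ih =>
    simp only [List.foldl_cons]
    by_cases h : cond a
    · rw [ih]; simp [h]
    · simp [h, ih]

theorem mark_get (l : List Int) (cond : Int → Bool) (idx : Int → Nat) (v : Char) (cs : List Char)
    (i : Nat) (hi : i < cs.length)
    (hlen : i < (l.foldl (fun cs a => if cond a then cs.set (idx a) v else cs) cs).length) :
    (l.foldl (fun cs a => if cond a then cs.set (idx a) v else cs) cs)[i] =
      if l.any (fun a => cond a && (idx a == i)) then v else cs[i] := by
  induction l generalizing cs with
  | nil => simp
  | cons a t ih =>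
    simp only [List.foldl_cons, List.any_cons]
    by_cases h : cond a
    · simp only [if_pos h]
      rw [ih _ (by simpa using hi) (by simpa [h] using hlen)]
      by_cases hidx : idx a = i
      · simp only [h, hidx, List.getElem_set, beq_self_eq_true, Bool.and_true,
          Bool.true_or, if_true]
        split <;> simp
      · have : (idx a == i) = false := by simp [hidx]
        simp [h, this, hidx]
    · simp only [if_neg h]
      rw [ih _ hi (by simpa [h] using hlen)]
      simp [h]

theorem mark_any (xs : List Int) (p rb : Int) (i : Nat) (hi : i < 64)
    (hfd : PySem.Int.floordiv (rb + (i : Int)) pvWORDS_PER_PAGE = p) :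
    ((xs.filter (fun a => PySem.Int.floordiv a pvWORDS_PER_PAGE == p)).any
      (fun a => (decide (rb ≤ a) && decide (a < rb + pvHALF_PAGE)) && ((a - rb).toNat == i)))
      = xs.any (fun a => a == rb + (i : Int)) := by
  have hh : pvHALF_PAGE = (64 : Int) := rfl
  rw [Bool.eq_iff_iff]
  simp only [List.any_eq_true, List.mem_filter, Bool.and_eq_true, decide_eq_true_eq,
    beq_iff_eq, hh]
  constructor
  · rintro ⟨a, ⟨hax, hafd⟩, ⟨hge, hlt⟩, hidx⟩
    exact ⟨a, hax, by omega⟩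
  · rintro ⟨a, hax, ha⟩
    subst ha
    exact ⟨rb + (i : Int), ⟨hax, hfd⟩, ⟨by omega, by omega⟩, by omega⟩

theorem cells_eq (memory : List (Int × Int)) (duplicates : List Int) (p rb : Int)
    (hrb : rb = p * 128 ∨ rb = p * 128 + 64) :
    (((memory.map (·.1)).filter (fun a => PySem.Int.floordiv a pvWORDS_PER_PAGE == p)).foldl
        (fun cells a => if decide (rb ≤ a) && decide (a < rb + pvHALF_PAGE) then cells.set (a - rb).toNat '#' else cells)
        (List.replicate pvHALF_PAGE.toNat '.')
      |> (duplicates.filter (fun a => PySem.Int.floordiv a pvWORDS_PER_PAGE == p)).foldl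
        (fun cells a => if decide (rb ≤ a) && decide (a < rb + pvHALF_PAGE) then cells.set (a - rb).toNat '!' else cells))
      = pvRowChars memory duplicates rb := by
  have hfd : ∀ i : Nat, i < 64 → PySem.Int.floordiv (rb + (i : Int)) pvWORDS_PER_PAGE = p := by
    intro i hi
    have hw : pvWORDS_PER_PAGE = (128 : Int) := rfl
    rw [hw, PySem.Int.floordiv_eq_iff_of_pos (by norm_num)]
    rcases hrb with h | h <;> constructor <;> omega
  apply List.ext_getElem
  · rw [mark_len, mark_len]
    simp [pvRowChars, pvHALF_PAGE]
  · intro i h1 h2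
    have hrep : (List.replicate pvHALF_PAGE.toNat '.').length = 64 := rfl
    have hil : i < 64 := by
      rw [mark_len, mark_len, hrep] at h1; exact h1
    rw [mark_get _ _ _ _ _ i (by rw [mark_len, hrep]; exact hil) h1,
        mark_get _ _ _ _ _ i (by rw [hrep]; exact hil) (by rw [mark_len, hrep]; exact hil)]
    rw [mark_any _ p rb i hil (hfd i hil), mark_any _ p rb i hil (hfd i hil)]
    simp only [pvRowChars, List.getElem_map, List.getElem_range, List.getElem_replicate]
    unfold pvCell
    have hdup : (duplicates.any fun a => a == rb + (i : Int)) = PySem.Set.contains duplicates (rb + (i : Int)) := by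
      rw [Bool.eq_iff_iff]
      simp [PySem.Set.contains, List.any_eq_true]
    have hmem : ((memory.map (·.1)).any fun a => a == rb + (i : Int)) = memory.any (fun q => q.1 == rb + (i : Int)) := by
      rw [List.any_map]
      rfl
    rw [hdup, hmem]

theorem wanted_eq (memory : List (Int × Int)) (duplicates : List Int) (mp : Int) :
    PySem.List.sorted
      ((PySem.Set.union
          (PySem.Set.ofList (PySem.Set.ofList ((memory.map (·.1)).map (fun a => PySem.Int.floordiv a pvWORDS_PER_PAGE))))
          (PySem.Set.ofList (duplicates.map (fun a => PySem.Int.floordiv a pvWORDS_PER_PAGE)))).filter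
        (fun q => decide (0 ≤ q) && decide (q ≤ mp)))
      (fun x => x) false
    = (PySem.List.pyRange 0 (mp + 1) 1).filter (fun q => pvOccupied memory duplicates q) := by
  apply PySem.List.sorted_eq_of_perm_of_pairwise_lt
  · rw [List.perm_ext_iff_of_nodup]
    · intro x
      simp only [List.mem_filter, PySem.List.mem_pyRange_one, PySem.Set.mem_union,
        PySem.Set.mem_ofList, List.mem_map, Bool.and_eq_true, decide_eq_true_eq,
        pvOccupied, pvKeys, List.any_eq_true, List.mem_append, beq_iff_eq]
      have hw : pvWORDS_PER_PAGE = (128 : Int) := rfl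
      rw [hw]
      constructor
      · rintro ⟨⟨h0, h1⟩, k, hk, hfd⟩
        refine ⟨?_, h0, by omega⟩
        rcases hk with ⟨a, ha, hak⟩ | hk
        · exact Or.inl ⟨k, ⟨a, ha, hak⟩, hfd⟩
        · exact Or.inr ⟨k, hk, hfd⟩
      · rintro ⟨hm, h0, h1⟩
        refine ⟨⟨h0, by omega⟩, ?_⟩
        rcases hm with ⟨k, hk, hfd⟩ | ⟨k, hk, hfd⟩
        · exact ⟨k, Or.inl hk, hfd⟩
        · exact ⟨k, Or.inr hk, hfd⟩
    · exact (PySem.List.nodup_pyRange_one 0 (mp + 1)).filter _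
    · exact (PySem.Set.nodup_union _ _ (PySem.Set.nodup_ofList _)).filter _
  · exact (PySem.List.pairwise_lt_pyRange_one 0 (mp + 1)).filter _

theorem iter_pages_alt_eq_canonical (memory : List (Int × Int)) (duplicates : List Int) (show_all : Bool)
    (max_address : Int) (h : PySem.List.max? (memory.map (·.1)) (fun x => x) = some max_address) (hne : memory.isEmpty = false) :
    iter_pages_alt memory duplicates show_all =
      pvCanonical memory duplicates show_all (PySem.Int.floordiv max_address 128) := by
  unfold iter_pages_alt
  rw [hne, h]
  simp only [Bool.false_eq_true, if_false]
  have hw : pvWORDS_PER_PAGE = (128 : Int) := rfl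
  rw [PySem.List.foldl_congr_mem _ _
    (fun pages page => pages ++ [(page, pvPageRows memory duplicates page)]) _
    (by
      intro acc page _
      simp only [List.foldl]
      rw [bucket_getD, bucket_getD]
      rw [cells_eq memory duplicates page (page * pvWORDS_PER_PAGE) (Or.inl rfl),
          cells_eq memory duplicates page (page * pvWORDS_PER_PAGE + pvHALF_PAGE) (Or.inr rfl)]
      rfl)]
  rw [PySem.List.foldl_append_singleton_eq_map]
  cases show_all
  · simp only [Bool.false_eq_true, if_false, List.nil_append]
    rw [bucket_keys, bucket_keys, wanted_eq]
    simp only [pvCanonical, Bool.false_or]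
    rfl
  · simp only [if_true, List.nil_append, pvCanonical, Bool.true_or, List.filter_true]
    rfl

-- ===== VERDICT (by name: the statement is the Claim_ definition above) =====
theorem iter_pages_spec : Claim_equal_iter_pages := by
  intro memory duplicates show_all _
  unfold Spec_iter_pages
  by_cases hne : memory.isEmpty
  · simp [iter_pages, iter_pages_alt, hne]
  · rcases hm : PySem.List.max? (memory.map (·.1)) (fun x => x) with _ | ma
    · rw [PySem.List.max?_eq_none_iff, List.map_eq_nil_iff] at hm
      simp [List.isEmpty_iff] at hne
      exact absurd hm hne
    · rw [iter_pages_eq_canonical memory duplicates show_all ma hm (by simpa using hne),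
          iter_pages_alt_eq_canonical memory duplicates show_all ma hm (by simpa using hne)]
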